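-- pv_equiv track=rewrite | github.com/bnbbbb/Algotithm | 프로그래머스/2/70129. 이진 변환 반복하기/이진 변환 반복하기.py | solution
-- ===== SOURCE A (Python) =====
-- def solution(s):
--     answer = []
--     sle = len(s)
--     count = 0
--     zero = 0
--     while len(s) != 1:
--         zero += len([i for i in s if i== '0'])
--         s = ''.join([i for i in s if i != '0'])
--         sle = len(s)
--         count += 1
--         s = bin(sle)[2:]
--     answer.extend([count, zero])
--     return answer
-- ===== SOURCE B (Python) =====
-- def solution(s):
--     # Recursively generate the trajectory of successive population counts,
--     # then derive the answer by aggregation (length + zip-sum), no accumulators.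
--     if len(s) == 1:
--         return [0, 0]
--
--     def chain(n):
--         return [n] if n <= 1 else [n] + chain(bin(n).count('1'))
--
--     traj = chain(len(s) - s.count('0'))
--     zeros = (len(s) - traj[0]) + sum(a.bit_length() - b for a, b in zip(traj, traj[1:]))
--     return [len(traj), zeros]
-- ===== Notes on version B (the rewrite author's own statement) =====
-- stated objective: alternative
-- what changed: B recursively generates the list of successive population counts as integers and then derives the answer by aggregation (list length, and a zip-sum of bit-length minus next popcount), instead of A's imperative loop that mutates a string and updates running count/zero accumulators.
import Mathlib
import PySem

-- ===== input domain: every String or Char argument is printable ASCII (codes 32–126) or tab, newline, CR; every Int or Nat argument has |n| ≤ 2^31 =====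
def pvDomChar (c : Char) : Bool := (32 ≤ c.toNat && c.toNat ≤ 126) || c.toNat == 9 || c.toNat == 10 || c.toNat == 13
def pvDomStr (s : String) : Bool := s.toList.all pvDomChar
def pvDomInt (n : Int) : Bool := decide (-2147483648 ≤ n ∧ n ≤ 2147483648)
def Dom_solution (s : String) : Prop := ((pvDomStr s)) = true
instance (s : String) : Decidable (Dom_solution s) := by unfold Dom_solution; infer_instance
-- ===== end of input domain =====

-- B replaces A's imperative string-mutating loop with accumulators by a recursively
-- generated integer trajectory plus declarative aggregation (objective: alternative).

-- ===== PORT A =====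
-- bin(n)[2:] for n > 0 (binary digits, MSB first); binChars 0 = [] and A's loop wraps that case to "0" below
def binChars : Nat → List Char
  | 0 => []
  | n+1 => binChars ((n+1)/2) ++ [if (n+1) % 2 = 1 then '1' else '0']
decreasing_by exact Nat.div_lt_self (Nat.succ_pos n) Nat.one_lt_two

-- (pop, width) of n: pop = number of 1-bits, width = bit length; cited by both ports' termination proofs
def popw : Nat → Nat × Nat
  | 0 => (0, 0)
  | n+1 => ((popw ((n+1)/2)).1 + (n+1) % 2, (popw ((n+1)/2)).2 + 1)
decreasing_by all_goals exact Nat.div_lt_self (Nat.succ_pos n) Nat.one_lt_two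

-- equation lemmas (the definitions are well-founded, so they do not reduce definitionally)
theorem popw_zero : popw 0 = (0, 0) := by rw [popw]
theorem popw_succ (n : Nat) : popw (n+1) = ((popw ((n+1)/2)).1 + (n+1) % 2, (popw ((n+1)/2)).2 + 1) := by rw [popw]
theorem binChars_zero : binChars 0 = [] := by rw [binChars]
theorem binChars_succ (n : Nat) : binChars (n+1) = binChars ((n+1)/2) ++ [if (n+1) % 2 = 1 then '1' else '0'] := by rw [binChars]

theorem binChars_one : binChars 1 = ['1'] := by
  rw [show (1:Nat) = 0+1 by rfl, binChars_succ, show (0+1)/2 = 0 by norm_num, binChars_zero]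
  rfl

-- facts cited by the termination proofs of loopA and chainB
theorem popw_pop_le_width : ∀ n : Nat, (popw n).1 ≤ (popw n).2 := by
  intro n
  induction n using Nat.strong_induction_on with
  | _ n ih =>
    rcases n with _ | m
    · rw [popw_zero]
    · rw [popw_succ]
      have := ih ((m+1)/2) (Nat.div_lt_self (Nat.succ_pos m) (by norm_num))
      omega

theorem popw_le_self : ∀ n : Nat, 1 ≤ n → (popw n).2 ≤ n := by
  intro n
  induction n using Nat.strong_induction_on with
  | _ n ih =>
    intro _
    rcases n with _ | m
    · omega
    · rw [popw_succ]
      rcases m with _ | k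
      · rw [show (0+1)/2 = 0 by norm_num, popw_zero]
      · have := ih ((k+1+1)/2) (by omega) (by omega)
        omega

theorem popw_pop_lt_self : ∀ n : Nat, 2 ≤ n → (popw n).1 < n := by
  intro n h2
  rcases n with _ | m
  · omega
  · rw [popw_succ]
    have h1 : 1 ≤ (m+1)/2 := by omega
    have hw := popw_le_self ((m+1)/2) h1
    have hp := popw_pop_le_width ((m+1)/2)
    omega

theorem binChars_length : ∀ n : Nat, (binChars n).length = (popw n).2 := by
  intro n
  induction n using Nat.strong_induction_on with
  | _ n ih =>
    rcases n with _ | m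
    · rw [binChars_zero, popw_zero]; rfl
    · rw [binChars_succ, popw_succ]
      have := ih ((m+1)/2) (Nat.div_lt_self (Nat.succ_pos m) (by norm_num))
      simp [this]

theorem binChars_filter_ne : ∀ n : Nat,
    ((binChars n).filter (fun i => i != '0')).length = (popw n).1 := by
  intro n
  induction n using Nat.strong_induction_on with
  | _ n ih =>
    rcases n with _ | m
    · rw [binChars_zero, popw_zero]; rfl
    · rw [binChars_succ, popw_succ]
      rw [List.filter_append, List.length_append, ih ((m+1)/2) (Nat.div_lt_self (Nat.succ_pos m) (by norm_num))]
      rcases Nat.mod_two_eq_zero_or_one (m+1) with h | h <;> simp [h, List.filter]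

-- decrease of A's loop measure, named so the proof term sits outside the loop definition
theorem loopA_dec (s t : List Char) (h : ¬ s.length = 1)
    (ht : t = if (s.filter (fun i => i != '0')).length = 0 then ['0']
              else binChars (s.filter (fun i => i != '0')).length) :
    (if t.length = 1 then 0 else 2 * t.length + (t.filter (fun i => i != '0')).length + 1)
    < if s.length = 1 then 0 else 2 * s.length + (s.filter (fun i => i != '0')).length + 1 := by
  subst ht
  rw [if_neg h]
  by_cases hz : (s.filter (fun i => i != '0')).length = 0
  · rw [if_pos hz]
    simp
  · rw [if_neg hz]
    set sle := (s.filter (fun i => i != '0')).length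
    have hlen : sle ≤ s.length := List.length_filter_le _ _
    by_cases h1 : (binChars sle).length = 1
    · rw [if_pos h1]
      omega
    · rw [if_neg h1]
      have hbl := binChars_length sle
      have hbf := binChars_filter_ne sle
      have hsle2 : 2 ≤ sle := by
        by_contra hc
        have h1' : sle = 1 := by omega
        exact h1 (by simp [h1', binChars_one])
      have hws : (popw sle).2 ≤ sle := popw_le_self sle (by omega)
      have hps : (popw sle).1 < sle := popw_pop_lt_self sle hsle2
      rw [hbl, hbf]
      omega

-- the loop of A: while len(s) != 1: zero += #zeros in s; s := s without zeros; count += 1; s := bin(len s)[2:]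
def loopA : List Char → Int → Int → Int × Int
  | s, count, zero =>
    if s.length = 1 then (count, zero)
    else
      loopA (if (s.filter (fun i => i != '0')).length = 0 then ['0']
             else binChars (s.filter (fun i => i != '0')).length)
            (count + 1)
            (zero + ((s.filter (fun i => i == '0')).length : Int))
termination_by s _ _ => if s.length = 1 then 0 else 2 * s.length + (s.filter (fun i => i != '0')).length + 1
decreasing_by
  exact loopA_dec s _ ‹¬ s.length = 1› (by simp)

def solution (s : String) : List Int :=
  let r := loopA s.toList 0 0
  [r.1, r.2]

-- ===== PORT B =====
-- popcount, i.e. bin(n).count('1')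
def popB : Nat → Nat
  | 0 => 0
  | n+1 => popB ((n+1)/2) + (n+1) % 2
decreasing_by exact Nat.div_lt_self (Nat.succ_pos n) Nat.one_lt_two

-- n.bit_length()
def blenB : Nat → Nat
  | 0 => 0
  | n+1 => blenB ((n+1)/2) + 1
decreasing_by exact Nat.div_lt_self (Nat.succ_pos n) Nat.one_lt_two

theorem popB_zero : popB 0 = 0 := by rw [popB]
theorem popB_succ (n : Nat) : popB (n+1) = popB ((n+1)/2) + (n+1) % 2 := by rw [popB]
theorem popB_eq : ∀ n : Nat, popB n = (popw n).1 := by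
  intro n
  induction n using Nat.strong_induction_on with
  | _ n ih =>
    rcases n with _ | m
    · rw [popB_zero, popw_zero]
    · rw [popB_succ, popw_succ, ih ((m+1)/2) (Nat.div_lt_self (Nat.succ_pos m) (by norm_num))]

-- cited by chainB's termination proof
theorem popB_lt_self (n : Nat) (h : 2 ≤ n) : popB n < n := by
  rw [popB_eq]; exact popw_pop_lt_self n h

-- chain(n) = [n] if n <= 1 else [n] + chain(bin(n).count('1'))
def chainB : Nat → List Nat
  | n => if n ≤ 1 then [n] else n :: chainB (popB n)
termination_by n => n
decreasing_by exact popB_lt_self n (Nat.not_le.mp (by assumption))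

def solution_alt (s : String) : List Int :=
  if s.toList.length = 1 then [0, 0]
  else
    let traj := chainB (s.toList.length - s.toList.count '0')
    -- traj[0]: chainB is never empty (its head is its argument), so headD is exact here
    let zeros : Int := ((s.toList.length : Int) - (traj.headD 0 : Int)) +
      ((traj.zip traj.tail).map (fun p => ((blenB p.1 : Int) - (p.2 : Int)))).sum
    [(traj.length : Int), zeros]

-- ===== PRECONDITION & SPEC =====
def Spec_solution (s : String) (out : List Int) : Prop := out = solution_alt s
instance (s : String) (out : List Int) : Decidable (Spec_solution s out) := by unfold Spec_solution; infer_instance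

-- ===== CLAIM (what is proved, stated in full; the proofs are below) =====
def Claim_equal_solution : Prop := ∀ (s : String), Dom_solution s → Spec_solution s (solution s)

-- ===== LEMMAS AND PROOFS =====

theorem blenB_zero : blenB 0 = 0 := by rw [blenB]
theorem blenB_succ (n : Nat) : blenB (n+1) = blenB ((n+1)/2) + 1 := by rw [blenB]

theorem blenB_eq : ∀ n : Nat, blenB n = (popw n).2 := by
  intro n
  induction n using Nat.strong_induction_on with
  | _ n ih =>
    rcases n with _ | m
    · rw [blenB_zero, popw_zero]
    · rw [blenB_succ, popw_succ, ih ((m+1)/2) (Nat.div_lt_self (Nat.succ_pos m) (by norm_num))]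

theorem chainB_eq (n : Nat) : chainB n = if n ≤ 1 then [n] else n :: chainB (popB n) := by
  rw [chainB]

theorem chainB_cons (n : Nat) : ∃ r, chainB n = n :: r := by
  rw [chainB_eq]; split_ifs
  · exact ⟨[], rfl⟩
  · exact ⟨_, rfl⟩

-- the zip-sum of B, as a function of the trajectory's starting value
def zsum (n : Nat) : Int :=
  (((chainB n).zip (chainB n).tail).map (fun p => ((blenB p.1 : Int) - (p.2 : Int)))).sum

theorem zsum_le_one (n : Nat) (h : n ≤ 1) : zsum n = 0 := by
  unfold zsum
  rw [chainB_eq, if_pos h]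
  rfl

theorem zsum_step (n : Nat) (h : 2 ≤ n) :
    zsum n = ((popw n).2 : Int) - ((popw n).1 : Int) + zsum ((popw n).1) := by
  obtain ⟨r, hr⟩ := chainB_cons (popB n)
  unfold zsum
  rw [chainB_eq n, if_neg (by omega : ¬ n ≤ 1), hr]
  simp only [List.tail_cons, List.zip_cons_cons, List.map_cons, List.sum_cons]
  rw [← popB_eq n, hr, blenB_eq n]
  simp only [List.tail_cons]

theorem popw_pop_pos : ∀ n : Nat, 1 ≤ n → 1 ≤ (popw n).1 := by
  intro n
  induction n using Nat.strong_induction_on with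
  | _ n ih =>
    intro _
    rcases n with _ | m
    · omega
    · rw [popw_succ]
      rcases Nat.mod_two_eq_zero_or_one (m+1) with h | h
      · have h1 : 1 ≤ (m+1)/2 := by omega
        have := ih ((m+1)/2) (by omega) h1
        omega
      · omega

theorem popw_width_pos : ∀ n : Nat, 1 ≤ n → 1 ≤ (popw n).2 := by
  intro n h
  rcases n with _ | m
  · omega
  · rw [popw_succ]; omega

theorem filter_split (l : List Char) :
    (l.filter (fun i => i == '0')).length + (l.filter (fun i => i != '0')).length = l.length := by
  induction l with
  | nil => rfl
  | cons a t ih =>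
    by_cases h : a = '0'
    · subst h
      simp
      omega
    · simp [h]
      omega

-- zeros of binChars n = width - pop (its characters are only '0' and '1')
theorem binChars_filter_eq (n : Nat) :
    ((binChars n).filter (fun i => i == '0')).length = (popw n).2 - (popw n).1 := by
  have h := filter_split (binChars n)
  rw [binChars_length n, binChars_filter_ne n] at h
  have hp := popw_pop_le_width n
  omega

-- after the first pass A's string is always bin(ones); from there A's loop computes
-- exactly the length of B's trajectory and its zip-sum
theorem loopA_chain : ∀ n : Nat, 1 ≤ n → ∀ c z : Int,
    loopA (binChars n) (c+1) z = (c + ((chainB n).length : Int), z + zsum n) := by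
  intro n
  induction n using Nat.strong_induction_on with
  | _ n ih =>
    intro h1 c z
    rw [loopA]
    by_cases hn1 : n = 1
    · subst hn1
      rw [chainB_eq, zsum_le_one 1 (by omega)]
      simp [binChars_one]
    · have hn2 : 2 ≤ n := by omega
      have hlen : (binChars n).length = (popw n).2 := binChars_length n
      have hw2 : 2 ≤ (popw n).2 := by
        rcases n with _ | m
        · omega
        · rw [popw_succ]
          have := popw_width_pos ((m+1)/2) (by omega)
          omega
      have hp1 : 1 ≤ (popw n).1 := popw_pop_pos n (by omega)
      rw [if_neg (show ¬(binChars n).length = 1 by omega)]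
      simp only [binChars_filter_ne n, binChars_filter_eq n]
      rw [if_neg (show ¬(popw n).1 = 0 by omega)]
      rw [show (c + 1 + 1 : Int) = (c + 1) + 1 by ring]
      rw [ih (popw n).1 (popw_pop_lt_self n hn2) hp1 (c+1) _]
      rw [chainB_eq n, if_neg (by omega : ¬ n ≤ 1), popB_eq n, zsum_step n hn2]
      have hle := popw_pop_le_width n
      simp only [Prod.mk.injEq, List.length_cons]
      constructor
      · push_cast
        ring
      · push_cast [Nat.cast_sub hle]
        ring

theorem count_eq_filter_len (l : List Char) :
    (l.filter (fun i => i == '0')).length = l.count '0' := by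
  rw [List.count_eq_length_filter]

theorem filter_ne_len (l : List Char) :
    (l.filter (fun i => i != '0')).length = l.length - l.count '0' := by
  have h := filter_split l
  rw [count_eq_filter_len] at h
  omega

theorem chainB_headD (n : Nat) : ((chainB n).headD 0) = n := by
  obtain ⟨r, hr⟩ := chainB_cons n
  rw [hr]; rfl

-- ===== VERDICT (by name: the statement is the Claim_ definition above) =====
theorem solution_spec : Claim_equal_solution := by
  unfold Claim_equal_solution Spec_solution
  intro s _
  unfold solution solution_alt
  by_cases h1 : s.toList.length = 1
  · rw [loopA]
    simp [h1]
  · rw [if_neg h1, loopA, if_neg h1]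
    simp only [count_eq_filter_len, filter_ne_len]
    have hcle : s.toList.count '0' ≤ s.toList.length := List.count_le_length
    by_cases hz : s.toList.length - s.toList.count '0' = 0
    · rw [if_pos hz, loopA]
      have hcnt : s.toList.count '0' = s.toList.length := by omega
      rw [hz, chainB_eq 0, if_pos (by norm_num : (0:Nat) ≤ 1)]
      simp [hcnt]
    · rw [if_neg hz, chainB_headD]
      have hones : 1 ≤ s.toList.length - s.toList.count '0' := by omega
      rw [show (0 + 1 : Int) = (0:Int) + 1 by ring, loopA_chain _ hones 0 _]
      have hcast : (↑(s.toList.count '0') : Int) =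
          (↑s.toList.length : Int) - ↑(s.toList.length - s.toList.count '0') := by
        push_cast [Nat.cast_sub hcle]
        ring
      rw [hcast]
      norm_num [zsum]
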